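-- pv_equiv track=rewrite | github.com/damianoimola/fundamentals-of-it-exercises | pre_practical_exam_function.py | get_highest_matindex
-- ===== SOURCE A (Python) =====
-- def get_column(mat, col):
--     # @param mat : Matrix
--     # @param col : Int
--     # @return list
--     column = []
--     for x in range(0, len(mat)):
--         column.append(mat[x][col])
--     return column
--
-- def get_highest_matindex(mat):
--     # @param mat : Matrix
--     # @return Int
--     # rows
--     higher_row_index = -1
--     higher_row_value = -1
--     i = 0
--     while i < len(mat):
--         current_sum = sum(mat[i])
--         if current_sum > higher_row_value:
--             higher_row_value = current_sum
--             higher_row_index = i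
--         i = i + 1
--
--     # columns
--     higher_col_index = -1
--     higher_col_value = -1
--     j = 0
--     while j < len(mat[0]):
--         current_sum = sum(get_column(mat, j))
--         if current_sum > higher_col_value:
--             higher_col_value = current_sum
--             higher_col_index = j
--         j = j + 1
--     return higher_col_index, higher_row_index
-- ===== SOURCE B (Python) =====
-- def get_highest_matindex(mat):
--     # One pass over the rows builds all column sums (and tracks the best row);
--     # a second pass selects the best column from the sums table.
--     ncols = len(mat[0])
--     col_sums = [0] * ncols
--     best_row_index, best_row_value = -1, -1
--     for i, row in enumerate(mat):
--         for j in range(ncols):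
--             col_sums[j] += row[j]
--         s = sum(row)
--         if s > best_row_value:
--             best_row_value, best_row_index = s, i
--     best_col_index, best_col_value = -1, -1
--     for j, s in enumerate(col_sums):
--         if s > best_col_value:
--             best_col_value, best_col_index = s, j
--     return best_col_index, best_row_index
-- ===== Notes on version B (the rewrite author's own statement) =====
-- stated objective: alternative
-- what changed: A recomputes each column with get_column (a fresh pass over all rows per column); B builds all column sums in a single pass over the rows (folding the row-max tracking into the same loop) and then selects the best column from the sums table in a second argmax pass.
import Mathlib
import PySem

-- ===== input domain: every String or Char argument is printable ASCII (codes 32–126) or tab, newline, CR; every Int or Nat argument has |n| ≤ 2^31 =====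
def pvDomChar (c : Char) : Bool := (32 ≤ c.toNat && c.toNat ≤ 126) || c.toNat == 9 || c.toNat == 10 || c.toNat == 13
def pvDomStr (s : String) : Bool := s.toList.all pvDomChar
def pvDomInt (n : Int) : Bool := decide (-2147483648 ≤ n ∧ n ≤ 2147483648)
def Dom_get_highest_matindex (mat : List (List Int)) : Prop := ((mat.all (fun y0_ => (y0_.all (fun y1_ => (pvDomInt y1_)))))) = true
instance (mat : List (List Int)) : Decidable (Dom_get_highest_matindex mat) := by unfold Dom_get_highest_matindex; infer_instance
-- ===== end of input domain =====

-- B replaces A's per-column re-scan (get_column) by a single accumulation pass over the rows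
-- building all column sums, then one argmax pass over that table; same return value wherever A returns.

-- ===== PORT A =====
-- get_column: column = []; for x in range(len(mat)): column.append(mat[x][col])
def pvGetColumn (mat : List (List Int)) (col : Int) : List Int :=
  mat.foldl (fun column row => column ++ [PySem.List.pyGetD row col 0]) []

-- while i < len(mat): walk the rows carrying the counter i and the best (index, value)
def pvRowLoopA : List (List Int) → Int → Int → Int → Int × Int
  | [], _, hri, hrv => (hri, hrv)
  | row :: rest, i, hri, hrv =>
      if row.sum > hrv then pvRowLoopA rest (i + 1) i row.sum
      else pvRowLoopA rest (i + 1) hri hrv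

-- while j < len(mat[0]): fuel counts the remaining columns, j is the Python counter
def pvColLoopA (mat : List (List Int)) : Nat → Int → Int → Int → Int × Int
  | 0, _, hci, hcv => (hci, hcv)
  | n + 1, j, hci, hcv =>
      if (pvGetColumn mat j).sum > hcv then pvColLoopA mat n (j + 1) j (pvGetColumn mat j).sum
      else pvColLoopA mat n (j + 1) hci hcv

def get_highest_matindex (mat : List (List Int)) : Int × Int :=
  ((pvColLoopA mat (PySem.List.pyGetD mat 0 []).length 0 (-1) (-1)).1,
   (pvRowLoopA mat 0 (-1) (-1)).1)

-- ===== PORT B =====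
-- for j in range(ncols): col_sums[j] += row[j]
def pvColSumsB (ncols : Nat) (colSums : List Int) (row : List Int) : List Int :=
  (List.range ncols).map (fun j => colSums.getD j 0 + PySem.List.pyGetD row (j : Int) 0)

-- for i, row in enumerate(mat): update col_sums and the best (row index, row sum)
def pvBFold (ncols : Nat) (rows : List (List Int)) (s : Int) (st : List Int × Int × Int) :
    List Int × Int × Int :=
  (PySem.List.enumerate rows s).foldl
    (fun st p =>
      if p.2.sum > st.2.2 then (pvColSumsB ncols st.1 p.2, p.1, p.2.sum)
      else (pvColSumsB ncols st.1 p.2, st.2.1, st.2.2)) st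

-- for j, s in enumerate(col_sums): strict-> argmax with the -1 sentinels
def pvArgmaxB (xs : List Int) : Int × Int :=
  (PySem.List.enumerate xs 0).foldl (fun st p => if p.2 > st.2 then p else st) (-1, -1)

def get_highest_matindex_alt (mat : List (List Int)) : Int × Int :=
  let ncols := (PySem.List.pyGetD mat 0 []).length
  let st := pvBFold ncols mat 0 (List.replicate ncols 0, -1, -1)
  ((pvArgmaxB st.1).1, st.2.1)

-- ===== PRECONDITION & SPEC =====
-- Pre_ excludes exactly the inputs where the Python A raises IndexError: the empty matrix
-- (mat[0]) and matrices with some row shorter than the first row (mat[x][col] in get_column).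
def Pre_get_highest_matindex (mat : List (List Int)) : Prop :=
  mat ≠ [] ∧ ∀ r ∈ mat, (mat.headD []).length ≤ r.length
instance (mat : List (List Int)) : Decidable (Pre_get_highest_matindex mat) := by
  unfold Pre_get_highest_matindex; infer_instance
def pvWitness_get_highest_matindex : List (List Int) := [[1, 2], [3, 4]]

def Spec_get_highest_matindex (mat : List (List Int)) (out : Int × Int) : Prop := out = get_highest_matindex_alt mat
instance (mat : List (List Int)) (out : Int × Int) : Decidable (Spec_get_highest_matindex mat out) := by unfold Spec_get_highest_matindex; infer_instance

-- ===== CLAIM (what is proved, stated in full; the proofs are below) =====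
def Claim_equal_get_highest_matindex : Prop := ∀ (mat : List (List Int)), Dom_get_highest_matindex mat → Pre_get_highest_matindex mat → Spec_get_highest_matindex mat (get_highest_matindex mat)

-- ===== LEMMAS AND PROOFS =====

-- common shape of both selection loops: fuel n, counter j, state (best index, best value)
def pvSel (f : Int → Int) : Nat → Int → Int × Int → Int × Int
  | 0, _, st => st
  | n + 1, j, st => pvSel f n (j + 1) (if f j > st.2 then (j, f j) else st)

theorem pvColLoopA_eq_sel (mat : List (List Int)) :
    ∀ (n : Nat) (j hci hcv : Int),
      pvColLoopA mat n j hci hcv = pvSel (fun j => (pvGetColumn mat j).sum) n j (hci, hcv) := by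
  intro n
  induction n with
  | zero => intro j hci hcv; rfl
  | succ n ih =>
    intro j hci hcv
    simp only [pvColLoopA, pvSel]
    split_ifs with h
    · exact ih (j + 1) j _
    · exact ih (j + 1) hci hcv

theorem pvArgmax_range'_eq_sel (f : Int → Int) :
    ∀ (n s : Nat) (st : Int × Int),
      (PySem.List.enumerate ((List.range' s n).map (fun (k : Nat) => f (k : Int))) (s : Int)).foldl
        (fun st p => if p.2 > st.2 then p else st) st = pvSel f n (s : Int) st := by
  intro n
  induction n with
  | zero => intro s st; rfl
  | succ n ih =>
    intro s st
    rw [List.range'_succ]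
    simp only [List.map_cons, PySem.List.enumerate_cons, List.foldl_cons, pvSel]
    have hc : ((s : Int) + 1) = ((s + 1 : Nat) : Int) := by push_cast; ring
    rw [hc, ih (s + 1)]

theorem pvBFold_eq (ncols : Nat) :
    ∀ (rows : List (List Int)) (s : Int) (cs : List Int) (hri hrv : Int),
      pvBFold ncols rows s (cs, hri, hrv)
        = (rows.foldl (pvColSumsB ncols) cs, pvRowLoopA rows s hri hrv) := by
  intro rows
  induction rows with
  | nil => intro s cs hri hrv; rfl
  | cons r rest ih =>
    intro s cs hri hrv
    simp only [pvBFold, PySem.List.enumerate_cons, List.foldl_cons, pvRowLoopA]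
    split_ifs with h
    · exact ih (s + 1) _ _ _
    · exact ih (s + 1) _ _ _

theorem pvColSums_foldl_char (ncols : Nat) :
    ∀ (rows : List (List Int)) (g : Nat → Int),
      rows.foldl (pvColSumsB ncols) ((List.range ncols).map (fun k => g k))
        = (List.range ncols).map
            (fun k => g k + (rows.map (fun row => PySem.List.pyGetD row (k : Int) 0)).sum) := by
  intro rows
  induction rows with
  | nil => intro g; simp
  | cons r rest ih =>
    intro g
    rw [List.foldl_cons]
    have hstep : pvColSumsB ncols ((List.range ncols).map (fun k => g k)) r
        = (List.range ncols).map (fun k => g k + PySem.List.pyGetD r (k : Int) 0) := by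
      unfold pvColSumsB
      apply List.map_congr_left
      intro k hk
      rw [PySem.List.getD_map_range _ _ _ _ (List.mem_range.mp hk)]
    rw [hstep, ih (fun k => g k + PySem.List.pyGetD r (k : Int) 0)]
    apply List.map_congr_left
    intro k _
    simp [add_assoc]

theorem pvGetColumn_eq_map (mat : List (List Int)) (col : Int) :
    pvGetColumn mat col = mat.map (fun row => PySem.List.pyGetD row col 0) := by
  unfold pvGetColumn
  rw [PySem.List.foldl_append_singleton_eq_map]
  simp

theorem ports_eq (mat : List (List Int)) :
    get_highest_matindex mat = get_highest_matindex_alt mat := by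
  simp only [get_highest_matindex, get_highest_matindex_alt]
  rw [pvBFold_eq]
  have hrep : (List.replicate (PySem.List.pyGetD mat 0 []).length (0 : Int))
      = (List.range (PySem.List.pyGetD mat 0 []).length).map (fun _ => (0 : Int)) := by
    simp [List.map_const']
  rw [hrep, pvColSums_foldl_char]
  have hcs : ((List.range (PySem.List.pyGetD mat 0 []).length).map
        (fun (k : Nat) => (0 : Int) + (mat.map (fun row => PySem.List.pyGetD row (k : Int) 0)).sum))
      = (List.range' 0 (PySem.List.pyGetD mat 0 []).length).map
          (fun (k : Nat) => (fun j : Int => (pvGetColumn mat j).sum) (k : Int)) := by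
    rw [← List.range_eq_range']
    apply List.map_congr_left
    intro k _
    simp [pvGetColumn_eq_map]
  rw [hcs]
  have harg := pvArgmax_range'_eq_sel (fun j : Int => (pvGetColumn mat j).sum)
      (PySem.List.pyGetD mat 0 []).length 0 (-1, -1)
  simp only [Nat.cast_zero] at harg
  simp only [pvArgmaxB, harg, pvColLoopA_eq_sel]

-- ===== VERDICT (by name: the statement is the Claim_ definition above) =====
theorem get_highest_matindex_spec : Claim_equal_get_highest_matindex := by
  intro mat _ _
  unfold Spec_get_highest_matindex
  exact ports_eq mat
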